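-- pv_equiv track=rewrite | github.com/xteo/xPhotoFrame | post.py | _boldHashtag
-- ===== SOURCE A (Python) =====
-- def _boldHashtag(caption):
--     parts = caption.split(" ")
--     newParts = []
--     for aPart in parts:
--         if aPart.startswith("#"):
--             hashtag = "<font color='LightSkyBlue' size='4'>%s</font>" % aPart
--             newParts.append(hashtag)
--         else:
--             newParts.append(aPart)
--
--     return " ".join(newParts)
-- ===== SOURCE B (Python) =====
-- def _boldHashtag(caption):
--     # single left-to-right scan over the characters; no split/join of the whole string
--     out = []
--     i = 0
--     n = len(caption)
--     start = True          # are we at the beginning of a token?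
--     while i < n:
--         c = caption[i]
--         if c == ' ':
--             out.append(' ')
--             i += 1
--             start = True
--         else:
--             j = i
--             while j < n and caption[j] != ' ':
--                 j += 1
--             tok = caption[i:j]
--             if start and c == '#':
--                 out.append("<font color='LightSkyBlue' size='4'>" + tok + "</font>")
--             else:
--                 out.append(tok)
--             i = j
--             start = False
--     return ''.join(out)
-- ===== Notes on version B (the rewrite author's own statement) =====
-- stated objective: alternative
-- what changed: Replaces split-on-space / per-token loop / join with a single left-to-right character scan that detects token starts in place and emits the wrapped or plain token directly.
import Mathlib
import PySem

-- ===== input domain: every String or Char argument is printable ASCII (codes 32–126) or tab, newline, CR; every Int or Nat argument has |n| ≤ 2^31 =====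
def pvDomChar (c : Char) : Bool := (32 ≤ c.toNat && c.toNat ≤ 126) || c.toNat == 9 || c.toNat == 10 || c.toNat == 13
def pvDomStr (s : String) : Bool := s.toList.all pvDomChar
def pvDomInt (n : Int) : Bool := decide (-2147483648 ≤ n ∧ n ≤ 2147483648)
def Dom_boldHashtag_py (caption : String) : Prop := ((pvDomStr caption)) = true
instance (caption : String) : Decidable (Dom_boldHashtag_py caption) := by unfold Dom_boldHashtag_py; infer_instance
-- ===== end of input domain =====

-- B replaces A's split/loop/join with a single character scan; same return value on all inputs (alternative, not faster).

-- ===== PORT A =====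
def pvPre : List Char := "<font color='LightSkyBlue' size='4'>".toList
def pvSuf : List Char := "</font>".toList

def boldHashtag_py (caption : String) : String :=
  let parts := PySem.Chars.splitOn caption.toList [' ']
  let newParts := parts.foldl (fun acc aPart =>
    if PySem.Chars.startswith aPart ['#'] then
      acc ++ [pvPre ++ aPart ++ pvSuf]
    else
      acc ++ [aPart]) []
  String.ofList (PySem.Chars.join [' '] newParts)

-- ===== PORT B =====
-- single scan; `st` = we are at the start of a token
def pvScanB : List Char → Bool → List Char
  | [], _ => []
  | c :: rest, st =>
    if c = ' ' then ' ' :: pvScanB rest true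
    else
      let tok := c :: rest.takeWhile (fun x => x != ' ')
      let rest' := rest.dropWhile (fun x => x != ' ')
      (if st ∧ c = '#' then pvPre ++ tok ++ pvSuf else tok) ++ pvScanB rest' false
termination_by l _ => l.length
decreasing_by
  · simp
  · exact Nat.lt_succ_of_le (List.length_dropWhile_le _ _)

def boldHashtag_py_alt (caption : String) : String :=
  String.ofList (pvScanB caption.toList true)

-- ===== PRECONDITION & SPEC =====
def Spec_boldHashtag_py (caption : String) (out : String) : Prop := out = boldHashtag_py_alt caption
instance (caption : String) (out : String) : Decidable (Spec_boldHashtag_py caption out) := by unfold Spec_boldHashtag_py; infer_instance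

-- ===== CLAIM (what is proved, stated in full; the proofs are below) =====
def Claim_equal_boldHashtag_py : Prop := ∀ (caption : String), Dom_boldHashtag_py caption → Spec_boldHashtag_py caption (boldHashtag_py caption)

-- ===== LEMMAS AND PROOFS =====

-- a simple recursive split-on-' ' used only inside the proofs
def pvSp : List Char → List (List Char)
  | [] => [[]]
  | c :: rest => if c = ' ' then [] :: pvSp rest else (pvSp rest).modifyHead (c :: ·)

def pvGA (t : List Char) : List Char :=
  if PySem.Chars.startswith t ['#'] then pvPre ++ t ++ pvSuf else t

lemma pvSp_ne_nil (l : List Char) : pvSp l ≠ [] := by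
  cases l with
  | nil => simp [pvSp]
  | cons c rest =>
    simp only [pvSp]
    split
    · simp
    · cases h : pvSp rest with
      | nil => exact absurd h (pvSp_ne_nil rest)
      | cons p ps => simp [List.modifyHead]

lemma pv_go_eq (l : List Char) : ∀ (fuel : Nat) (cur : List Char) (acc : List (List Char)),
    l.length ≤ fuel →
    PySem.Chars.splitOn.go [' '] fuel l cur acc
      = acc.reverse ++ (pvSp l).modifyHead (cur.reverse ++ ·) := by
  induction l with
  | nil =>
    intro fuel cur acc _
    cases fuel <;> simp [PySem.Chars.splitOn.go, pvSp]
  | cons c rest ih =>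
    intro fuel cur acc hle
    cases fuel with
    | zero => simp at hle
    | succ f =>
      simp only [List.length_cons, Nat.succ_le_succ_iff] at hle
      by_cases hc : c = ' '
      · subst hc
        have hpre : List.isPrefixOf [' '] (' ' :: rest) = true := by
          simp [List.isPrefixOf]
        simp only [PySem.Chars.splitOn.go, hpre, if_pos]
        have hdrop : List.drop [' '].length (' ' :: rest) = rest := by simp
        rw [hdrop, ih f [] (List.reverse cur :: acc) hle]
        cases h : pvSp rest with
        | nil => exact absurd h (pvSp_ne_nil rest)
        | cons p ps => simp [pvSp, h, List.modifyHead]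
      · have hpre : List.isPrefixOf [' '] (c :: rest) = false := by
          simp [List.isPrefixOf]
          intro h; exact absurd h.symm hc
        simp only [PySem.Chars.splitOn.go, hpre]
        rw [if_neg (by simp)]
        rw [ih f (c :: cur) acc hle]
        cases h : pvSp rest with
        | nil => exact absurd h (pvSp_ne_nil rest)
        | cons p ps => simp [pvSp, hc, h, List.modifyHead]

lemma pv_splitOn_eq (l : List Char) :
    PySem.Chars.splitOn l [' '] = pvSp l := by
  rw [PySem.Chars.splitOn, pv_go_eq l (l.length + 1) [] [] (Nat.le_succ _)]
  cases h : pvSp l with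
  | nil => exact absurd h (pvSp_ne_nil l)
  | cons p ps => simp [List.modifyHead]

lemma pv_foldl_eq (parts : List (List Char)) : ∀ acc : List (List Char),
    parts.foldl (fun acc aPart =>
      if PySem.Chars.startswith aPart ['#'] then
        acc ++ [pvPre ++ aPart ++ pvSuf]
      else
        acc ++ [aPart]) acc = acc ++ parts.map pvGA := by
  induction parts with
  | nil => intro acc; simp
  | cons p ps ih =>
    intro acc
    simp only [List.foldl_cons, List.map_cons, pvGA]
    split <;> rw [ih] <;> simp

-- the head of a token is not ' ' iff startswith '#' reduces to the head test
lemma pv_startswith_cons (c : Char) (xs : List Char) :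
    PySem.Chars.startswith (c :: xs) ['#'] = (c == '#') := by
  simp [PySem.Chars.startswith, List.isPrefixOf]
  exact eq_comm

lemma pv_dropWhile_head (p : Char → Bool) (l : List Char) (d : Char) (r : List Char)
    (h : l.dropWhile p = d :: r) : p d = false := by
  induction l with
  | nil => simp [List.dropWhile] at h
  | cons x xs ih =>
    by_cases hx : p x = true
    · rw [List.dropWhile_cons_of_pos hx] at h; exact ih h
    · rw [List.dropWhile_cons_of_neg hx] at h
      cases h; simpa using hx

-- token structure of pvSp on a non-space head
lemma pv_sp_token (rest : List Char) : ∀ (c : Char), c ≠ ' ' →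
    pvSp (c :: rest) = (c :: rest.takeWhile (fun x => x != ' ')) ::
      (if rest.dropWhile (fun x => x != ' ') = [] then []
       else pvSp (rest.dropWhile (fun x => x != ' ')).tail) := by
  induction rest with
  | nil =>
    intro c hc
    simp [pvSp, hc, List.takeWhile, List.dropWhile]
  | cons d r ih =>
    intro c hc
    by_cases hd : d = ' '
    · subst hd
      simp [pvSp, hc, List.modifyHead]
    · have := ih d hd
      simp only [pvSp, if_neg hc] at this ⊢
      rw [this]
      have ht : (d :: r).takeWhile (fun x => x != ' ') = d :: r.takeWhile (fun x => x != ' ') := by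
        simp [hd]
      have hdr : (d :: r).dropWhile (fun x => x != ' ') = r.dropWhile (fun x => x != ' ') := by
        simp [hd]
      rw [ht, hdr]
      simp [List.modifyHead]

lemma pv_scan_eq (n : Nat) : ∀ (l : List Char), l.length ≤ n →
    pvScanB l true = PySem.Chars.join [' '] ((pvSp l).map pvGA) := by
  induction n with
  | zero =>
    intro l hl
    have : l = [] := List.eq_nil_of_length_eq_zero (Nat.le_zero.mp hl)
    subst this
    simp only [pvScanB, pvSp, pvGA, List.map_cons, List.map_nil]
    decide
  | succ n ih =>
    intro l hl
    cases l with
    | nil =>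
      simp only [pvScanB, pvSp, pvGA, List.map_cons, List.map_nil]
      decide
    | cons c rest =>
      simp only [List.length_cons, Nat.succ_le_succ_iff] at hl
      by_cases hc : c = ' '
      · subst hc
        rw [show pvScanB (' ' :: rest) true = ' ' :: pvScanB rest true from by
          simp [pvScanB]]
        rw [ih rest hl]
        cases h : pvSp rest with
        | nil => exact absurd h (pvSp_ne_nil rest)
        | cons p ps =>
          simp [pvSp, h, PySem.Chars.join, List.intercalate, pvGA,
                PySem.Chars.startswith, List.isPrefixOf]
      · rw [pv_sp_token rest c hc]
        rw [show pvScanB (c :: rest) true =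
            (if True ∧ c = '#' then pvPre ++ (c :: rest.takeWhile (fun x => x != ' ')) ++ pvSuf
             else c :: rest.takeWhile (fun x => x != ' ')) ++
            pvScanB (rest.dropWhile (fun x => x != ' ')) false from by
          rw [pvScanB]; rw [if_neg hc]; simp]
        have hg : (if True ∧ c = '#' then pvPre ++ (c :: rest.takeWhile (fun x => x != ' ')) ++ pvSuf
             else c :: rest.takeWhile (fun x => x != ' '))
            = pvGA (c :: rest.takeWhile (fun x => x != ' ')) := by
          simp only [pvGA, pv_startswith_cons, true_and]
          by_cases h : c = '#' <;> simp [h]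
        rw [hg]
        cases hdrop : rest.dropWhile (fun x => x != ' ') with
        | nil =>
          simp [pvScanB, PySem.Chars.join, List.intercalate]
        | cons d r2 =>
          have hd : d = ' ' := by
            have := pv_dropWhile_head _ rest d r2 hdrop
            simpa using this
          subst hd
          have hr2 : r2.length ≤ n := by
            have h1 : (' ' :: r2).length ≤ rest.length := by
              rw [← hdrop]; exact List.length_dropWhile_le _ _
            simp only [List.length_cons] at h1
            omega
          rw [show pvScanB (' ' :: r2) false = ' ' :: pvScanB r2 true from by
            simp [pvScanB]]
          rw [ih r2 hr2]
          simp only [if_neg (List.cons_ne_nil _ _), List.tail_cons, List.map_cons]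
          cases h2 : pvSp r2 with
          | nil => exact absurd h2 (pvSp_ne_nil r2)
          | cons p ps =>
            simp [PySem.Chars.join, List.intercalate]

-- ===== VERDICT (by name: the statement is the Claim_ definition above) =====
theorem boldHashtag_py_spec : Claim_equal_boldHashtag_py := by
  intro caption _
  unfold Spec_boldHashtag_py boldHashtag_py boldHashtag_py_alt
  dsimp only
  rw [pv_splitOn_eq, pv_foldl_eq, pv_scan_eq caption.toList.length _ (Nat.le_refl _)]
  simp
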